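-- pv_equiv track=rewrite | github.com/kingkaushalagarwal/100daysofcoding | testcase/new_test.py | solve
-- ===== SOURCE A (Python) =====
-- def justGreaterRight(arr):
--     n = len(arr)
--     ans = [0] * n
--     stack = []
--     for i in range(n):
--         x = arr[i]
--         if len(stack) == 0 or arr[stack[-1]] >= arr[i]:
--             stack.append(i)
--         else:
--             while len(stack) != 0 and arr[stack[-1]] < arr[i]:
--                 ind = stack.pop()
--                 ans[ind] = i
--             stack.append(i)
--     while len(stack) != 0:
--         ind = stack.pop()
--         ans[ind] = -1
--     return ans
--
-- def justGreaterLeft(arr):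
--     n = len(arr)
--     ans = [0] * n
--     stack = []
--     for i in range(len(arr) - 1, -1, -1):
--         if len(stack) == 0 or arr[stack[-1]] >= arr[i]:
--             stack.append(i)
--         else:
--             while len(stack) != 0 and arr[stack[-1]] < arr[i]:
--                 ind = stack.pop()
--                 ans[ind] = i
--             stack.append(i)
--     while len(stack) != 0:
--         ind = stack.pop()
--         ans[ind] = -1
--     return ans
--
-- def solve(arr):
--     left = justGreaterLeft(arr)
--     right = justGreaterRight(arr)
--     summ =0
--     n = len(arr)
--     for i in range(len(arr)):
--         if left[i]==-1 and right[i] ==-1: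
--             summ += n
--         elif right[i]==-1:
--             summ += n - (left[i]+1)
--         elif left[i]==-1:
--             summ+= right[i]
--         else:
--             summ += right[i] - left[i] -1
--     return summ
-- ===== SOURCE B (Python) =====
-- def solve(arr):
--     n = len(arr)
--     total = 0
--     for i in range(n):
--         x = arr[i]
--         L = -1
--         for j in range(i - 1, -1, -1):
--             if arr[j] > x:
--                 L = j
--                 break
--         R = n
--         for j in range(i + 1, n):
--             if arr[j] > x:
--                 R = j
--                 break
--         total += R - L - 1
--     return total
-- ===== Notes on version B (the rewrite author's own statement) =====
-- stated objective: simpler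
-- what changed: Replaced the two monotonic-stack passes plus case-analysis sum by a single loop that, for each index, scans directly left and right for the first strictly greater element and adds R - L - 1.
import Mathlib
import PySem

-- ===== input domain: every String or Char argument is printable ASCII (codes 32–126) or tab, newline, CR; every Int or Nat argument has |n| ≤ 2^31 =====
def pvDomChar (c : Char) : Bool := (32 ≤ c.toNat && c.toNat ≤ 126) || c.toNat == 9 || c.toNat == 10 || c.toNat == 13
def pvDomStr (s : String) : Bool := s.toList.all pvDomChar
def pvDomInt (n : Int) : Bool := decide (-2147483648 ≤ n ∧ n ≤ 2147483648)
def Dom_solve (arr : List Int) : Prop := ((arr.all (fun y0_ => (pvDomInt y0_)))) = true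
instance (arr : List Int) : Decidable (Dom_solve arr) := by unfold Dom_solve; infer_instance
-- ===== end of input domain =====

-- B replaces the two monotonic-stack passes and case-analysis sum by one loop that scans
-- left and right from each index for the first strictly greater element (objective: simpler).

-- ===== PORT A =====
-- arr[i] for an index produced by range(): always in range, default never used
def aget (arr : List Int) (i : Int) : Int := PySem.List.pyGetD arr i 0

-- the inner 'while' of both justGreater* functions: pop while arr[stack[-1]] < arr[i]
def jgrPop (arr : List Int) (i : Int) : List Int → List Int → List Int × List Int
  | ans, [] => (ans, [])
  | ans, ind :: rest =>
    if aget arr ind < aget arr i then jgrPop arr i (ans.set ind.toNat i) rest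
    else (ans, ind :: rest)

-- one iteration of the 'for' loop body (identical in justGreaterRight and justGreaterLeft)
def jgrStep (arr : List Int) (st : List Int × List Int) (i : Int) : List Int × List Int :=
  if st.2 = [] ∨ aget arr (st.2.headD 0) ≥ aget arr i then (st.1, i :: st.2)
  else
    let p := jgrPop arr i st.1 st.2
    (p.1, i :: p.2)

-- the trailing 'while': pop everything, ans[ind] = -1
def jgrDrain (ans : List Int) (stack : List Int) : List Int :=
  stack.foldl (fun a ind => a.set ind.toNat (-1)) ans

def justGreaterRight (arr : List Int) : List Int :=
  let n : Int := arr.length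
  let st := (PySem.List.pyRange 0 n 1).foldl (jgrStep arr) (List.replicate arr.length 0, [])
  jgrDrain st.1 st.2

def justGreaterLeft (arr : List Int) : List Int :=
  let n : Int := arr.length
  let st := (PySem.List.pyRange (n - 1) (-1) (-1)).foldl (jgrStep arr) (List.replicate arr.length 0, [])
  jgrDrain st.1 st.2

def solve (arr : List Int) : Int :=
  let left := justGreaterLeft arr
  let right := justGreaterRight arr
  let n : Int := arr.length
  (PySem.List.pyRange 0 n 1).foldl (fun summ i =>
    let li := aget left i
    let ri := aget right i
    if li = -1 ∧ ri = -1 then summ + n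
    else if ri = -1 then summ + (n - (li + 1))
    else if li = -1 then summ + ri
    else summ + (ri - li - 1)) 0

-- ===== PORT B =====
-- 'for j in seq: if arr[j] > x: return j' with default d when the loop completes
def findFirst (arr : List Int) (x : Int) (d : Int) : List Int → Int
  | [] => d
  | j :: rest => if aget arr j > x then j else findFirst arr x d rest

def solve_alt (arr : List Int) : Int :=
  let n : Int := arr.length
  (PySem.List.pyRange 0 n 1).foldl (fun total i =>
    let x := aget arr i
    let L := findFirst arr x (-1) (PySem.List.pyRange (i - 1) (-1) (-1))
    let R := findFirst arr x n (PySem.List.pyRange (i + 1) n 1)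
    total + (R - L - 1)) 0

-- ===== PRECONDITION & SPEC =====
def Spec_solve (arr : List Int) (out : Int) : Prop := out = solve_alt arr
instance (arr : List Int) (out : Int) : Decidable (Spec_solve arr out) := by unfold Spec_solve; infer_instance

-- ===== CLAIM (what is proved, stated in full; the proofs are below) =====
def Claim_equal_solve : Prop := ∀ (arr : List Int), Dom_solve arr → Spec_solve arr (solve arr)

-- ===== LEMMAS AND PROOFS =====
theorem set_getD (l : List Int) (i : Nat) (v : Int) (k : Nat) (hi : i < l.length) :
    (l.set i v).getD k 0 = if k = i then v else l.getD k 0 := by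
  simp only [List.getD_eq_getElem?_getD, List.getElem?_set]
  by_cases h : k = i
  · subst h; simp [hi]
  · simp [h, Ne.symm h]

theorem drain_getD (stack : List Int) : ∀ (ans : List Int) (k : Nat),
    (∀ j ∈ stack, 0 ≤ j ∧ j.toNat < ans.length) → k < ans.length →
    (jgrDrain ans stack).getD k 0 = if (k : Int) ∈ stack then -1 else ans.getD k 0 := by
  induction stack with
  | nil => intro ans k _ _; simp [jgrDrain]
  | cons ind rest ih =>
    intro ans k hst hk
    have hind := hst ind (by simp)
    have hstep : jgrDrain ans (ind :: rest) = jgrDrain (ans.set ind.toNat (-1)) rest := rfl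
    rw [hstep, ih (ans.set ind.toNat (-1)) k
        (by intro j hj; simpa using hst j (by simp [hj])) (by simpa using hk)]
    rw [set_getD ans ind.toNat (-1) k hind.2]
    have hiff : ((k : Int) = ind ↔ k = ind.toNat) := by omega
    by_cases h1 : (k : Int) ∈ rest <;> by_cases h2 : (k : Int) = ind <;> simp_all

theorem jgrPop_snd (arr : List Int) (i : Int) :
    ∀ (stack ans : List Int),
      (jgrPop arr i ans stack).2 = stack.dropWhile (fun j => decide (aget arr j < aget arr i)) := by
  intro stack
  induction stack with
  | nil => intro ans; rfl
  | cons ind rest ih =>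
    intro ans
    by_cases h : aget arr ind < aget arr i
    · simp [jgrPop, h, List.dropWhile, ih]
    · simp [jgrPop, h, List.dropWhile]

theorem jgrPop_fst_length (arr : List Int) (i : Int) :
    ∀ (stack ans : List Int), ((jgrPop arr i ans stack).1).length = ans.length := by
  intro stack
  induction stack with
  | nil => intro ans; rfl
  | cons ind rest ih =>
    intro ans
    by_cases h : aget arr ind < aget arr i
    · simp [jgrPop, h, ih]
    · simp [jgrPop, h]

theorem jgrPop_fst_getD (arr : List Int) (i : Int) :
    ∀ (stack ans : List Int) (k : Nat),
      (∀ j ∈ stack, 0 ≤ j ∧ j.toNat < ans.length) → stack.Nodup →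
      ((jgrPop arr i ans stack).1).getD k 0 =
        if (k : Int) ∈ stack.takeWhile (fun j => decide (aget arr j < aget arr i)) then i
        else ans.getD k 0 := by
  intro stack
  induction stack with
  | nil => intro ans k _ _; simp [jgrPop, List.takeWhile]
  | cons ind rest ih =>
    intro ans k hb hnd
    have hind := hb ind (by simp)
    by_cases h : aget arr ind < aget arr i
    · have hstep : (jgrPop arr i ans (ind :: rest)).1 = (jgrPop arr i (ans.set ind.toNat i) rest).1 := by
        simp [jgrPop, h]
      rw [hstep, ih (ans.set ind.toNat i) k
          (by intro j hj; simpa using hb j (by simp [hj])) (List.Nodup.of_cons hnd)]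
      rw [set_getD ans ind.toNat i k hind.2]
      have hiff : ((k : Int) = ind ↔ k = ind.toNat) := by omega
      have hnotin : ind ∉ rest := by simp at hnd; exact hnd.1
      have htw : (ind :: rest).takeWhile (fun j => decide (aget arr j < aget arr i))
          = ind :: rest.takeWhile (fun j => decide (aget arr j < aget arr i)) := by
        simp [List.takeWhile, h]
      rw [htw]
      by_cases h2 : (k : Int) = ind
      · have : (k:Int) ∉ rest.takeWhile (fun j => decide (aget arr j < aget arr i)) := by
          intro hmem; exact hnotin (h2 ▸ List.takeWhile_subset _ hmem)
        simp [h2, hiff.mp h2, this]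
        intro hc
        exact absurd hc (not_lt.mpr hind.1)
      · have hk : k ≠ ind.toNat := fun hh => h2 (hiff.mpr hh)
        simp [hk, h2]
    · have htw : (ind :: rest).takeWhile (fun j => decide (aget arr j < aget arr i)) = [] := by
        simp [List.takeWhile, h]
      simp only [jgrPop, if_neg h, htw]
      simp

def afterOcc (j : Int) : List Int → List Int
  | [] => []
  | i :: rest => if i = j then rest else afterOcc j rest

def jgrRun (arr : List Int) (ans stack : List Int) : List Int → List Int
  | [] => jgrDrain ans stack
  | i :: rest =>
    let st := jgrStep arr (ans, stack) i
    jgrRun arr st.1 st.2 rest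

theorem jgrRun_eq (arr : List Int) :
    ∀ (seq ans stack : List Int),
      jgrDrain (seq.foldl (jgrStep arr) (ans, stack)).1 (seq.foldl (jgrStep arr) (ans, stack)).2
        = jgrRun arr ans stack seq := by
  intro seq
  induction seq with
  | nil => intro ans stack; rfl
  | cons i rest ih =>
    intro ans stack
    simp only [List.foldl_cons, jgrRun]
    exact ih _ _

theorem stack_ge (arr : List Int) (i s0 : Int) (t : List Int)
    (hp : (s0 :: t).Pairwise (fun a b => aget arr a ≤ aget arr b))
    (hge : aget arr i ≤ aget arr s0) :
    ∀ j ∈ s0 :: t, aget arr i ≤ aget arr j := by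
  rw [List.pairwise_cons] at hp
  intro j hj
  rcases List.mem_cons.mp hj with h | h
  · exact h ▸ hge
  · exact le_trans hge (hp.1 j h)

theorem dropWhile_ge (arr : List Int) (i : Int) :
    ∀ (stack : List Int), stack.Pairwise (fun a b => aget arr a ≤ aget arr b) →
      ∀ j ∈ stack.dropWhile (fun j => decide (aget arr j < aget arr i)), aget arr i ≤ aget arr j := by
  intro stack
  induction stack with
  | nil => intro _ j hj; simp [List.dropWhile] at hj
  | cons s0 t ih =>
    intro hp j hj
    by_cases h : aget arr s0 < aget arr i
    · rw [List.dropWhile_cons_of_pos (by simpa using h)] at hj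
      exact ih (List.Pairwise.of_cons hp) j hj
    · rw [List.dropWhile_cons_of_neg (by simpa using h)] at hj
      exact stack_ge arr i s0 t hp (not_lt.mp h) j hj

theorem main_spec (arr : List Int) :
    ∀ (seq stack ans : List Int),
      ans.length = arr.length →
      (∀ j ∈ stack, 0 ≤ j ∧ j.toNat < arr.length) →
      (∀ j ∈ seq, 0 ≤ j ∧ j.toNat < arr.length) →
      stack.Pairwise (fun a b => aget arr a ≤ aget arr b) →
      stack.Nodup → seq.Nodup →
      (∀ j ∈ stack, j ∉ seq) →
      ∀ k : Nat, k < arr.length →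
        (jgrRun arr ans stack seq).getD k 0 =
          if (k : Int) ∈ stack then findFirst arr (aget arr (k : Int)) (-1) seq
          else if (k : Int) ∈ seq then findFirst arr (aget arr (k : Int)) (-1) (afterOcc (k : Int) seq)
          else ans.getD k 0 := by
  intro seq
  induction seq with
  | nil =>
    intro stack ans hlen hst _ _ _ _ _ k hk
    rw [show jgrRun arr ans stack [] = jgrDrain ans stack from rfl,
        drain_getD stack ans k (fun j hj => ⟨(hst j hj).1, by rw [hlen]; exact (hst j hj).2⟩)
          (by omega)]
    simp [findFirst]
  | cons i rest ih =>
    intro stack ans hlen hst hseq hp hnd hsnd hdisj k hk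
    have hi := hseq i (by simp)
    have hinost : i ∉ stack := fun h => hdisj i h (by simp)
    have hinorest : i ∉ rest := by simp at hsnd; exact hsnd.1
    by_cases hc : stack = [] ∨ aget arr (stack.headD 0) ≥ aget arr i
    · -- push branch
      have hstep : jgrRun arr ans stack (i :: rest) = jgrRun arr ans (i :: stack) rest := by
        show jgrRun arr (jgrStep arr (ans, stack) i).1 (jgrStep arr (ans, stack) i).2 rest = _
        simp only [jgrStep]
        rw [if_pos hc]
      have hall : ∀ j ∈ stack, aget arr i ≤ aget arr j := by
        cases stack with
        | nil => intro j hj; simp at hj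
        | cons s0 t =>
          rcases hc with h | h
          · exact absurd h (by simp)
          · exact stack_ge arr i s0 t hp (by simpa using h)
      rw [hstep, ih (i :: stack) ans hlen
          (by intro j hj; rcases List.mem_cons.mp hj with h | h; exacts [h ▸ hi, hst j h])
          (fun j hj => hseq j (by simp [hj]))
          (List.pairwise_cons.mpr ⟨hall, hp⟩)
          (List.nodup_cons.mpr ⟨hinost, hnd⟩)
          (List.Nodup.of_cons hsnd)
          (by intro j hj; rcases List.mem_cons.mp hj with h | h
              exacts [h ▸ hinorest, fun hr => hdisj j h (by simp [hr])])
          k hk]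
      by_cases m1 : (k : Int) ∈ stack
      · have hle : aget arr i ≤ aget arr (k : Int) := hall _ m1
        have hkno : (k : Int) ∉ (i :: rest) := hdisj _ m1
        simp only [List.mem_cons] at hkno
        push_neg at hkno
        simp [m1, findFirst, not_lt.mpr hle]
      · by_cases m2 : (k : Int) = i
        · simp [m2, m1, hinost, hinorest, afterOcc]
        · by_cases m3 : (k : Int) ∈ rest
          · simp [m1, m2, m3, afterOcc, Ne.symm m2]
          · simp [m1, m2, m3]
    · -- pop branch
      push_neg at hc
      have hstep : jgrRun arr ans stack (i :: rest)
          = jgrRun arr (jgrPop arr i ans stack).1 (i :: (jgrPop arr i ans stack).2) rest := by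
        show jgrRun arr (jgrStep arr (ans, stack) i).1 (jgrStep arr (ans, stack) i).2 rest = _
        simp only [jgrStep]
        rw [if_neg (by push_neg; exact ⟨hc.1, hc.2⟩)]
      have hkeptsub := (List.dropWhile_sublist (l := stack)
        (p := fun j => decide (aget arr j < aget arr i))).subset
      have hallk := dropWhile_ge arr i stack hp
      have hbnd : ∀ j ∈ stack, 0 ≤ j ∧ j.toNat < ans.length := by
        intro j hj; exact ⟨(hst j hj).1, by rw [hlen]; exact (hst j hj).2⟩
      rw [hstep, jgrPop_snd arr i stack ans,
          ih (i :: stack.dropWhile (fun j => decide (aget arr j < aget arr i)))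
            (jgrPop arr i ans stack).1
            (by rw [jgrPop_fst_length]; exact hlen)
            (by intro j hj; rcases List.mem_cons.mp hj with h | h
                exacts [h ▸ hi, hst j (hkeptsub h)])
            (fun j hj => hseq j (by simp [hj]))
            (List.pairwise_cons.mpr ⟨hallk, hp.sublist (List.dropWhile_sublist _)⟩)
            (List.nodup_cons.mpr ⟨fun h => hinost (hkeptsub h), hnd.sublist (List.dropWhile_sublist _)⟩)
            (List.Nodup.of_cons hsnd)
            (by intro j hj; rcases List.mem_cons.mp hj with h | h
                exacts [h ▸ hinorest, fun hr => hdisj j (hkeptsub h) (by simp [hr])])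
            k hk]
      have hpops := jgrPop_fst_getD arr i stack ans k hbnd hnd
      by_cases m1 : (k : Int) ∈ stack
      · have hkno : (k : Int) ∉ (i :: rest) := hdisj _ m1
        simp only [List.mem_cons] at hkno
        push_neg at hkno
        by_cases mk : (k : Int) ∈ stack.dropWhile (fun j => decide (aget arr j < aget arr i))
        · have hle : aget arr i ≤ aget arr (k : Int) := hallk _ mk
          simp [mk, m1, findFirst, not_lt.mpr hle]
        · have hpop : (k : Int) ∈ stack.takeWhile (fun j => decide (aget arr j < aget arr i)) := by
            have hta := List.takeWhile_append_dropWhile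
              (p := fun j => decide (aget arr j < aget arr i)) (l := stack)
            rw [← hta] at m1
            rcases List.mem_append.mp m1 with h | h
            · exact h
            · exact absurd h mk
          have hlt : aget arr (k : Int) < aget arr i := by
            simpa using List.mem_takeWhile_imp hpop
          rw [if_neg (by simp [hkno.1, mk]), if_neg hkno.2, hpops, if_pos hpop, if_pos m1]
          simp [findFirst, hlt]
      · have hknokept : (k : Int) ∉ stack.dropWhile (fun j => decide (aget arr j < aget arr i)) :=
          fun h => m1 (hkeptsub h)
        by_cases m2 : (k : Int) = i
        · simp [m2, m1, hinost, hinorest, afterOcc, hknokept]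
        · by_cases m3 : (k : Int) ∈ rest
          · simp [m1, m2, m3, hknokept, afterOcc, Ne.symm m2]
          · have hknopop : (k : Int) ∉ stack.takeWhile (fun j => decide (aget arr j < aget arr i)) :=
              fun h => m1 (List.takeWhile_subset _ h)
            rw [if_neg (by simp [m2, hknokept]), if_neg m3, hpops, if_neg hknopop,
                if_neg m1, if_neg (by simp [m2, m3])]

theorem afterOcc_range_pos : ∀ (m : Nat) (a k b : Int), a ≤ k → k < b → k - a = m →
    afterOcc k (PySem.List.pyRange a b 1) = PySem.List.pyRange (k + 1) b 1 := by
  intro m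
  induction m with
  | zero =>
    intro a k b h1 h2 h3
    have hak : a = k := by omega
    rw [PySem.List.pyRange_one_cons (by omega), afterOcc, if_pos hak, hak]
  | succ m ihm =>
    intro a k b h1 h2 h3
    rw [PySem.List.pyRange_one_cons (by omega), afterOcc, if_neg (by omega)]
    exact ihm (a + 1) k b (by omega) h2 (by omega)

theorem afterOcc_range_neg : ∀ (m : Nat) (a k : Int), 0 ≤ k → k ≤ a → a - k = m →
    afterOcc k (PySem.List.pyRange a (-1) (-1)) = PySem.List.pyRange (k - 1) (-1) (-1) := by
  intro m
  induction m with
  | zero =>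
    intro a k h1 h2 h3
    have hak : a = k := by omega
    rw [PySem.List.pyRange_neg_one_cons (by omega), afterOcc, if_pos hak, hak]
  | succ m ihm =>
    intro a k h1 h2 h3
    rw [PySem.List.pyRange_neg_one_cons (by omega), afterOcc, if_neg (by omega)]
    exact ihm (a - 1) k h1 (by omega) (by omega)

theorem justGreaterRight_getD (arr : List Int) (k : Nat) (hk : k < arr.length) :
    (justGreaterRight arr).getD k 0
      = findFirst arr (aget arr (k : Int)) (-1) (PySem.List.pyRange ((k : Int) + 1) arr.length 1) := by
  rw [show justGreaterRight arr
      = jgrRun arr (List.replicate arr.length 0) [] (PySem.List.pyRange 0 arr.length 1) from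
      jgrRun_eq arr _ _ _]
  rw [main_spec arr (PySem.List.pyRange 0 arr.length 1) [] (List.replicate arr.length 0)
      (List.length_replicate)
      (by intro j hj; simp at hj)
      (by intro j hj; rw [PySem.List.mem_pyRange_one] at hj; constructor <;> omega)
      (List.Pairwise.nil) (List.nodup_nil) (PySem.List.nodup_pyRange_one _ _)
      (by intro j hj; simp at hj)
      k hk]
  rw [if_neg (by simp), if_pos (by rw [PySem.List.mem_pyRange_one]; omega),
      afterOcc_range_pos k 0 (k : Int) arr.length (by omega) (by omega) (by omega)]

theorem justGreaterLeft_getD (arr : List Int) (k : Nat) (hk : k < arr.length) :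
    (justGreaterLeft arr).getD k 0
      = findFirst arr (aget arr (k : Int)) (-1) (PySem.List.pyRange ((k : Int) - 1) (-1) (-1)) := by
  rw [show justGreaterLeft arr
      = jgrRun arr (List.replicate arr.length 0) []
          (PySem.List.pyRange ((arr.length : Int) - 1) (-1) (-1)) from
      jgrRun_eq arr _ _ _]
  rw [main_spec arr (PySem.List.pyRange ((arr.length : Int) - 1) (-1) (-1)) []
      (List.replicate arr.length 0)
      (List.length_replicate)
      (by intro j hj; simp at hj)
      (by intro j hj; rw [PySem.List.mem_pyRange_neg_one] at hj; constructor <;> omega)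
      (List.Pairwise.nil) (List.nodup_nil)
      (by rw [PySem.List.pyRange_neg_one_eq_reverse, List.nodup_reverse]
          exact PySem.List.nodup_pyRange_one _ _)
      (by intro j hj; simp at hj)
      k hk]
  rw [if_neg (by simp), if_pos (by rw [PySem.List.mem_pyRange_neg_one]; omega),
      afterOcc_range_neg ((arr.length : Int) - 1 - k).toNat ((arr.length : Int) - 1) (k : Int)
        (by omega) (by omega) (by omega)]

theorem findFirst_default (arr : List Int) (x d : Int) :
    ∀ seq : List Int, (∀ j ∈ seq, 0 ≤ j) →
      findFirst arr x d seq
        = (if findFirst arr x (-1) seq = -1 then d else findFirst arr x (-1) seq) := by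
  intro seq
  induction seq with
  | nil => intro _; simp [findFirst]
  | cons j rest ihr =>
    intro hb
    by_cases h : aget arr j > x
    · have hj := hb j (by simp)
      simp [findFirst, h]
      omega
    · simp only [findFirst, if_neg h]
      exact ihr (fun j hj => hb j (by simp [hj]))

theorem solve_eq_alt (arr : List Int) : solve arr = solve_alt arr := by
  show (PySem.List.pyRange 0 (arr.length : Int) 1).foldl _ 0
      = (PySem.List.pyRange 0 (arr.length : Int) 1).foldl _ 0
  apply PySem.List.foldl_congr_mem
  intro acc i hi
  rw [PySem.List.mem_pyRange_one] at hi
  obtain ⟨k, rfl⟩ : ∃ k : Nat, i = (k : Int) := ⟨i.toNat, by omega⟩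
  have hk : k < arr.length := by omega
  have hL : aget (justGreaterLeft arr) (k : Int)
      = findFirst arr (aget arr (k : Int)) (-1) (PySem.List.pyRange ((k : Int) - 1) (-1) (-1)) := by
    rw [aget, PySem.List.pyGetD_natCast, justGreaterLeft_getD arr k hk]
  have hR : aget (justGreaterRight arr) (k : Int)
      = findFirst arr (aget arr (k : Int)) (-1) (PySem.List.pyRange ((k : Int) + 1) arr.length 1) := by
    rw [aget, PySem.List.pyGetD_natCast, justGreaterRight_getD arr k hk]
  have hRd := findFirst_default arr (aget arr (k : Int)) (arr.length : Int)
      (PySem.List.pyRange ((k : Int) + 1) arr.length 1)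
      (by intro j hj; rw [PySem.List.mem_pyRange_one] at hj; omega)
  simp only [hL, hR, hRd]
  set L := findFirst arr (aget arr (k : Int)) (-1) (PySem.List.pyRange ((k : Int) - 1) (-1) (-1))
  set R := findFirst arr (aget arr (k : Int)) (-1) (PySem.List.pyRange ((k : Int) + 1) arr.length 1)
  split_ifs <;> omega

-- ===== VERDICT (by name: the statement is the Claim_ definition above) =====
theorem solve_spec : Claim_equal_solve := by
  unfold Claim_equal_solve Spec_solve
  intro arr _
  exact solve_eq_alt arr
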